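-- pv_equiv track=rewrite | github.com/happyphonon/capital_one_solution | problem_40.py | solution
-- ===== SOURCE A (Python) =====
-- def solution(arr):
--     res = [0 for _ in range(len(arr))]
--     i, j = 0, len(arr) - 1
--     for val in arr:
--         if val % 2 == 0:
--             res[i] = val
--             i += 1
--         if val % 2 == 1:
--             res[j] = val
--             j -= 1
--     return res
-- ===== SOURCE B (Python) =====
-- def solution(arr):
--     evens = [v for v in arr if v % 2 == 0]
--     odds = [v for v in arr if v % 2 == 1]
--     return evens + odds[::-1]
-- ===== Notes on version B (the rewrite author's own statement) =====
-- stated objective: simpler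
-- what changed: Replaces the in-place two-pointer write into a preallocated zero buffer with two filter passes concatenated with the reversed odds.
import Mathlib
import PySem

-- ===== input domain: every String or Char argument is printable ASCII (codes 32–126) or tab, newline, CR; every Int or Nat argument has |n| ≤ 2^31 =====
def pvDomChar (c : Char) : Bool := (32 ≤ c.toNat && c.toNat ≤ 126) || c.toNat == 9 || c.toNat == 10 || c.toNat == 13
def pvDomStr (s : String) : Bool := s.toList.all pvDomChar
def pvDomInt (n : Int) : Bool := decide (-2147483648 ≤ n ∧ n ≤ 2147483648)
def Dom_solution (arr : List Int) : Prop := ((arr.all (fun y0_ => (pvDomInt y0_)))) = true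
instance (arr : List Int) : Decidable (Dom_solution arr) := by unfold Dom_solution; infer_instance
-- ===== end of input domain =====

-- B is a simpler decomposition: two filter passes concatenated with the reversed odds,
-- instead of A's two-pointer in-place writes into a preallocated zero buffer. Return value only.

-- ===== PORT A =====
-- the for-loop of A: state (res, i, j), writes evens at i (ascending), odds at j (descending)
def solutionLoop (vals : List Int) (res : List Int) (i j : Int) : List Int :=
  match vals with
  | [] => res
  | v :: rest =>
    let (res1, i1) := if PySem.Int.mod v 2 = 0 then (res.set i.toNat v, i + 1) else (res, i)
    let (res2, j1) := if PySem.Int.mod v 2 = 1 then (res1.set j.toNat v, j - 1) else (res1, j)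
    solutionLoop rest res2 i1 j1

def solution (arr : List Int) : List Int :=
  solutionLoop arr (List.replicate arr.length 0) 0 ((arr.length : Int) - 1)

-- ===== PORT B =====
def solution_alt (arr : List Int) : List Int :=
  (arr.filter (fun v => PySem.Int.mod v 2 = 0)) ++
    (arr.filter (fun v => PySem.Int.mod v 2 = 1)).reverse

-- ===== PRECONDITION & SPEC =====
def Spec_solution (arr : List Int) (out : List Int) : Prop := out = solution_alt arr
instance (arr : List Int) (out : List Int) : Decidable (Spec_solution arr out) := by unfold Spec_solution; infer_instance

-- ===== CLAIM (what is proved, stated in full; the proofs are below) =====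
def Claim_equal_solution : Prop := ∀ (arr : List Int), Dom_solution arr → Spec_solution arr (solution arr)

-- ===== LEMMAS AND PROOFS =====

theorem pv_mod_two (v : Int) : PySem.Int.mod v 2 = 0 ∨ PySem.Int.mod v 2 = 1 := by
  have h1 := PySem.Int.mod_nonneg v (b := 2) (by omega)
  have h2 := PySem.Int.mod_lt v (b := 2) (by omega)
  omega

theorem solutionLoop_inv (vals : List Int) : ∀ (E O : List Int),
    solutionLoop vals (E ++ List.replicate vals.length 0 ++ O)
        (E.length : Int) ((E.length : Int) + (vals.length : Int) - 1)
      = E ++ vals.filter (fun v => PySem.Int.mod v 2 = 0)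
          ++ (vals.filter (fun v => PySem.Int.mod v 2 = 1)).reverse ++ O := by
  induction vals with
  | nil => intro E O; simp [solutionLoop]
  | cons v rest ih =>
    intro E O
    rcases pv_mod_two v with h | h
    · -- even case
      have hne : PySem.Int.mod v 2 ≠ 1 := by omega
      have hset : (E ++ List.replicate (v :: rest).length 0 ++ O).set
          ((E.length : Int)).toNat v
          = (E ++ [v]) ++ List.replicate rest.length 0 ++ O := by
        simp [List.replicate_succ]
      have := ih (E ++ [v]) O
      have hi : ((E.length : Int) + 1) = ((E ++ [v]).length : Int) := by simp
      have hj : (E.length : Int) + ((v :: rest).length : Int) - 1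
          = ((E ++ [v]).length : Int) + (rest.length : Int) - 1 := by simp; omega
      simp only [solutionLoop, h, hset, if_true,
        if_neg (show ¬ ((0:Int) = 1) by decide)]
      rw [hi, hj, this]
      have he : v % 2 = 0 := by
        rw [← PySem.Int.mod_eq_emod_of_pos (by omega)]; exact h
      have hd : (2 : Int) ∣ v := (PySem.Int.mod_eq_zero_iff_dvd v 2).mp h
      simp [hd, he]
    · -- odd case
      have hne : PySem.Int.mod v 2 ≠ 0 := by omega
      have hset : (E ++ List.replicate (v :: rest).length 0 ++ O).set
          ((E.length : Int) + ((v :: rest).length : Int) - 1).toNat v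
          = E ++ List.replicate rest.length 0 ++ (v :: O) := by
        have hidx : ((E.length : Int) + ((v :: rest).length : Int) - 1).toNat
            = E.length + rest.length := by simp; omega
        rw [hidx]
        have hrep : List.replicate (v :: rest).length (0 : Int)
            = List.replicate rest.length 0 ++ [0] := by
          simp [List.replicate_succ']
        rw [hrep]
        rw [show E ++ (List.replicate rest.length (0:Int) ++ [0]) ++ O
            = (E ++ List.replicate rest.length 0) ++ ([0] ++ O) by simp]
        rw [List.set_append]
        simp
      have := ih E (v :: O)
      have hj : (E.length : Int) + ((v :: rest).length : Int) - 1 - 1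
          = (E.length : Int) + (rest.length : Int) - 1 := by simp; omega
      simp only [solutionLoop, h, if_true,
        if_neg (show ¬ ((1:Int) = 0) by decide)]
      rw [hset, hj, this]
      have he : v % 2 = 1 := by
        rw [← PySem.Int.mod_eq_emod_of_pos (by omega)]; exact h
      have hd : ¬ (2 : Int) ∣ v := by omega
      simp [hd, he]

-- ===== VERDICT (by name: the statement is the Claim_ definition above) =====
theorem solution_spec : Claim_equal_solution := by
  intro arr _
  unfold Spec_solution solution solution_alt
  have := solutionLoop_inv arr [] []
  simpa using this
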